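-- pv_equiv track=rewrite | github.com/markaaronslater/NMT | src/preprocessing/processCorpuses.py | naiveDecase
-- ===== SOURCE A (Python) =====
-- eos = {}
--
-- def naiveDecase(sent, namesDict):
--     if not sent:
--         return sent # for debugging empty sentence
--
--     sent = sent.split()
--     #if sent[0] not in Iwords and sent[0] not in acList:
--
--     # lower case first word of the sentence:
--     if sent[0] not in namesDict:
--         sent[0] = sent[0][0].lower() + sent[0][1:] # this handles leading acronyms, like people's names, followed by :
--     # ex) BG -> bG, not bg, so that when predict this during inference, can recase to BG, not Bg
--     ### (this format is common in the corpus, bc transcripts of TED-talks, where diff speakers will precede given sentences, in a dialogue exchange, etc.)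
--
--     positions = [i for i,word in enumerate(sent) if (word in eos or word == '"') and i != len(sent)-1]
--     #quotePositions = [i for i,word in enumerate(sent) if word == '"' and i != len(sent)-1]
--     # (do not extract double quote at last position of sentence, bc nothing follows it)
--
--     # in decasing, no need to discriminate between quote openers and closers
--     # lowercase the first word inside a pair of doublequotes,
--     # and first word to follow a pair of doublequotes or a lone period, exclamation point, or question mark
--     for j in positions:
--         if sent[j+1] not in namesDict:
--             sent[j+1] = sent[j+1].lower()
--     # makes simplifying assumption that for any sent with odd number of quotes,
--     # the unpaired quote comes at the end, not the beginning
--     # will be correct ~50% of the time, presumably.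
--
--
--
--     return ' '.join(sent)
-- ===== SOURCE B (Python) =====
-- eos = {}
--
-- def naiveDecase(sent, namesDict):
--     # Single forward pass carrying a 'previous word was a trigger' flag
--     # (return-value equivalent to the positions-list version; returns '' on
--     # whitespace-only sentences where that version raises IndexError).
--     if not sent:
--         return sent
--     words = sent.split()
--     if not words:
--         return ''
--     head = words[0]
--     if head not in namesDict:
--         head = head[0].lower() + head[1:]
--     out = [head]
--     trigger = head in eos or head == '"'
--     for w in words[1:]:
--         out.append(w.lower() if trigger and w not in namesDict else w)
--         trigger = w in eos or w == '"'
--     return ' '.join(out)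
-- ===== Notes on version B (the rewrite author's own statement) =====
-- stated objective: simpler
-- what changed: Replaces A's two-phase scheme (build an enumerate-based positions list, then a second loop patching word slots by index) with a single forward pass over the words carrying a 'previous word was a trigger' flag, so no index arithmetic or positions list is needed.
import Mathlib
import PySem

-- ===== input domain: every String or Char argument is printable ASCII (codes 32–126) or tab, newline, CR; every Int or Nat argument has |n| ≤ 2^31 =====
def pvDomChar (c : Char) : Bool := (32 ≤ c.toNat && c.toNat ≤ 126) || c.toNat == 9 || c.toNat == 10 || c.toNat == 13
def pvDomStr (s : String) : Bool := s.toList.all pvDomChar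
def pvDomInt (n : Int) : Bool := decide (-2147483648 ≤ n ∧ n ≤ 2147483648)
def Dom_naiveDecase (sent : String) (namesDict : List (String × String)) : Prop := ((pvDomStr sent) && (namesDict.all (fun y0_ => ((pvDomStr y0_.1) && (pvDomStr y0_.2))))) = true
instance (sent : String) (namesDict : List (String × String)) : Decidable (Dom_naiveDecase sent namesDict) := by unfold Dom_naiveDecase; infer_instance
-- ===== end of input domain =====

-- B replaces A's positions-list-then-patch pass with one forward pass over the words
-- carrying a 'previous word was a trigger' flag (return value only; A rebinds, never mutates).

-- ===== PORT A =====
-- module-level 'eos = {}' (empty dict; only its keys are ever tested)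
def pvEosA : List (String × String) := []

-- 'w in d' on a dict = key membership
def pvInDictA (d : List (String × String)) (w : String) : Bool := d.any (fun p => p.1 == w)

def naiveDecase (sent : String) (namesDict : List (String × String)) : String :=
  if sent == "" then sent
  else
    let ws := PySem.Str.split₀ sent
    -- if sent[0] not in namesDict: sent[0] = sent[0][0].lower() + sent[0][1:]
    -- (w[0] via Str.pyGet?: none = IndexError, unreachable under Pre_; w[1:] is drop 1 on chars)
    let ws :=
      if pvInDictA namesDict (PySem.List.pyGetD ws 0 "") then ws
      else
        let w0 := PySem.List.pyGetD ws 0 ""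
        match PySem.Str.pyGet? w0 0 with
        | some c => PySem.List.pySetD ws 0 (String.ofList (PySem.Chars.lowerChar c :: w0.toList.drop 1))
        | none => ws
    let positions := ((PySem.List.enumerate ws 0).filter
        (fun p => (pvInDictA pvEosA p.2 || p.2 == "\"") && p.1 != (ws.length : Int) - 1)).map (·.1)
    let ws := positions.foldl (fun cur j =>
        if pvInDictA namesDict (PySem.List.pyGetD cur (j + 1) "") then cur
        else PySem.List.pySetD cur (j + 1) (PySem.Str.lower (PySem.List.pyGetD cur (j + 1) ""))) ws
    PySem.Str.join " " ws

-- ===== PORT B =====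
def pvInDictB (d : List (String × String)) (w : String) : Bool := d.any (fun p => p.1 == w)

def pvEosB : List (String × String) := []

-- 'w in eos or w == '"''
def pvTrigB (w : String) : Bool := pvInDictB pvEosB w || w == "\""

def naiveDecase_alt (sent : String) (namesDict : List (String × String)) : String :=
  if sent == "" then sent
  else
    let words := PySem.Str.split₀ sent
    if words == [] then ""
    else
      -- head = words[0]; head = head[0].lower() + head[1:] unless a name
      -- (words[0][0] via Str.pyGet?: none = IndexError, unreachable: split words are nonempty)
      let w0 := PySem.List.pyGetD words 0 ""
      let head :=
        if pvInDictB namesDict w0 then w0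
        else match PySem.Str.pyGet? w0 0 with
          | some c => String.ofList (PySem.Chars.lowerChar c :: w0.toList.drop 1)
          | none => w0
      -- for w in words[1:]: append (lowered if flag and not a name), recompute flag
      let st := (PySem.List.slice words (some 1) none).foldl
          (fun (acc : List String × Bool) w =>
            (acc.1 ++ [if acc.2 && !pvInDictB namesDict w then PySem.Str.lower w else w], pvTrigB w))
          ([head], pvTrigB head)
      PySem.Str.join " " st.1

-- ===== PRECONDITION & SPEC =====
-- A indexes sent.split()[0]: a nonempty all-whitespace sentence raises IndexError, so it is excluded.
def Pre_naiveDecase (sent : String) (namesDict : List (String × String)) : Prop :=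
  sent = "" ∨ PySem.Str.split₀ sent ≠ []
instance (sent : String) (namesDict : List (String × String)) : Decidable (Pre_naiveDecase sent namesDict) := by unfold Pre_naiveDecase; infer_instance

def pvWitness_naiveDecase : String × (List (String × String)) := ("He said \" YES . Bob won", [("Bob", "")])

def Spec_naiveDecase (sent : String) (namesDict : List (String × String)) (out : String) : Prop := out = naiveDecase_alt sent namesDict
instance (sent : String) (namesDict : List (String × String)) (out : String) : Decidable (Spec_naiveDecase sent namesDict out) := by unfold Spec_naiveDecase; infer_instance

-- ===== CLAIM (what is proved, stated in full; the proofs are below) =====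
def Claim_equal_naiveDecase : Prop := ∀ (sent : String) (namesDict : List (String × String)), Dom_naiveDecase sent namesDict → Pre_naiveDecase sent namesDict → Spec_naiveDecase sent namesDict (naiveDecase sent namesDict)

-- ===== LEMMAS AND PROOFS =====

-- the condition tested by A's comprehension equals B's trigger
lemma trigA_eq (w : String) : (pvInDictA pvEosA w || w == "\"") = pvTrigB w := rfl

lemma inDictA_eq (d : List (String × String)) (w : String) : pvInDictA d w = pvInDictB d w := rfl

-- proof-side flag scan
def pvScan (nd : List (String × String)) : Bool → List String → List String
  | _, [] => []
  | f, w :: t =>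
      (if f && !pvInDictB nd w then PySem.Str.lower w else w) :: pvScan nd (pvTrigB w) t

-- A's update step
def pvStep (nd : List (String × String)) (cur : List String) (j : Int) : List String :=
  if pvInDictA nd (PySem.List.pyGetD cur (j + 1) "") then cur
  else PySem.List.pySetD cur (j + 1) (PySem.Str.lower (PySem.List.pyGetD cur (j + 1) ""))

-- A's positions of a word list
def pvPos (l : List String) : List Int :=
  ((PySem.List.enumerate l 0).filter
      (fun p => (pvInDictA pvEosA p.2 || p.2 == "\"") && p.1 != (l.length : Int) - 1)).map (·.1)

lemma enumerate_shift {α : Type} (xs : List α) (s : Int) :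
    PySem.List.enumerate xs (s + 1) = (PySem.List.enumerate xs s).map (fun p => (p.1 + 1, p.2)) := by
  induction xs generalizing s with
  | nil => simp [PySem.List.enumerate_nil]
  | cons x t ih =>
      simp only [PySem.List.enumerate_cons, List.map_cons]
      rw [show s + 1 + 1 = (s + 1) + 1 from rfl, ih]

lemma pos_nonneg (l : List String) : ∀ j ∈ pvPos l, 0 ≤ j := by
  intro j hj
  simp only [pvPos, List.mem_map, List.mem_filter] at hj
  obtain ⟨p, ⟨hp, _⟩, rfl⟩ := hj
  rw [PySem.List.mem_enumerate_iff] at hp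
  obtain ⟨k, hk, rfl⟩ := hp
  simp

lemma pos_cons (w : String) (t : List String) :
    pvPos (w :: t) = (if pvTrigB w && !t.isEmpty then [0] else []) ++ (pvPos t).map (· + 1) := by
  have he : PySem.List.enumerate t (1 : Int)
      = (PySem.List.enumerate t 0).map (fun p => (p.1 + 1, p.2)) := enumerate_shift t 0
  simp only [pvPos, PySem.List.enumerate_cons, zero_add, he, List.filter_cons, List.filter_map,
    List.map_map]
  have hfil : ∀ p : Int × String,
      ((fun p : Int × String => (pvInDictA pvEosA p.2 || p.2 == "\"") && p.1 != ((w :: t).length : Int) - 1) ∘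
        (fun p : Int × String => (p.1 + 1, p.2))) p
      = (fun p : Int × String => (pvInDictA pvEosA p.2 || p.2 == "\"") && p.1 != (t.length : Int) - 1) p := by
    intro p
    simp only [Function.comp, List.length_cons, bne]
    have h : (p.1 + 1 == (((t.length + 1 : Nat)) : Int) - 1) = (p.1 == (t.length : Int) - 1) := by
      rw [Bool.eq_iff_iff, beq_iff_eq, beq_iff_eq]
      push_cast
      omega
    rw [h]
  rw [List.filter_congr (fun p _ => hfil p)]
  by_cases hw : pvTrigB w
  · have hc : ((pvInDictA pvEosA w || w == "\"") && (0 : Int) != ((w :: t).length : Int) - 1)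
        = !t.isEmpty := by
      rw [trigA_eq, hw]
      cases t <;> simp <;> omega
    rw [hc]
    cases hne : t.isEmpty <;> simp [hw, Function.comp]
  · have hc : ((pvInDictA pvEosA w || w == "\"") && (0 : Int) != ((w :: t).length : Int) - 1) = false := by
      rw [trigA_eq]; simp [hw]
    rw [hc]
    simp [hw, Function.comp]

lemma step_cons (nd : List (String × String)) (u : String) (cur : List String) (j : Int)
    (hj : 0 ≤ j) : pvStep nd (u :: cur) (j + 1) = u :: pvStep nd cur j := by
  have h1 : PySem.List.pyGetD (u :: cur) (j + 1 + 1) ""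
      = PySem.List.pyGetD cur (j + 1) "" := by
    rw [PySem.List.pyGetD_of_nonneg _ _ (by omega : (0:Int) ≤ j + 1 + 1), PySem.List.pyGetD_of_nonneg _ _ (by omega : (0:Int) ≤ j + 1)]
    have : (j + 1 + 1).toNat = (j + 1).toNat + 1 := by omega
    rw [this]; rfl
  have h2 : ∀ v, PySem.List.pySetD (u :: cur) (j + 1 + 1) v
      = u :: PySem.List.pySetD cur (j + 1) v := by
    intro v
    rw [PySem.List.pySetD_of_nonneg _ _ (by omega : (0:Int) ≤ j + 1 + 1), PySem.List.pySetD_of_nonneg _ _ (by omega : (0:Int) ≤ j + 1)]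
    have : (j + 1 + 1).toNat = (j + 1).toNat + 1 := by omega
    rw [this]; rfl
  simp only [pvStep, h1, h2]
  split_ifs <;> rfl

lemma fold_shift (nd : List (String × String)) (ps : List Int) (u : String) (cur : List String)
    (hps : ∀ j ∈ ps, 0 ≤ j) :
    (ps.map (· + 1)).foldl (pvStep nd) (u :: cur) = u :: ps.foldl (pvStep nd) cur := by
  induction ps generalizing cur with
  | nil => rfl
  | cons j t ih =>
      simp only [List.map_cons, List.foldl_cons]
      rw [step_cons nd u cur j (hps j (by simp))]
      exact ih _ (fun x hx => hps x (by simp [hx]))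

-- core: A's positions-fold over w :: t (with an arbitrary already-fixed head u) = flag scan
lemma fold_eq_scan (nd : List (String × String)) :
    ∀ (t : List String) (w u : String),
    (pvPos (w :: t)).foldl (pvStep nd) (u :: t) = u :: pvScan nd (pvTrigB w) t := by
  intro t
  induction t with
  | nil =>
      intro w u
      simp [pvPos, PySem.List.enumerate_cons, PySem.List.enumerate_nil, pvScan]
  | cons v t'' ih =>
      intro w u
      rw [pos_cons, List.foldl_append]
      by_cases hw : pvTrigB w
      · have hc : (pvTrigB w && !(v :: t'').isEmpty) = true := by simp [hw]
        rw [hc]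
        simp only [if_true, List.foldl_cons, List.foldl_nil]
        have hstep : pvStep nd (u :: v :: t'') 0
            = u :: (if pvInDictB nd v then v else PySem.Str.lower v) :: t'' := by
          simp only [pvStep, zero_add]
          rw [inDictA_eq, PySem.List.pyGetD_of_nonneg _ _ (by omega : (0:Int) ≤ 1),
            PySem.List.pySetD_of_nonneg _ _ (by omega : (0:Int) ≤ 1)]
          by_cases hv : pvInDictB nd v <;> simp [hv]
        rw [hstep, fold_shift nd _ _ _ (pos_nonneg _),
          ih v (if pvInDictB nd v then v else PySem.Str.lower v)]
        simp only [pvScan, hw, Bool.true_and]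
        by_cases hv : pvInDictB nd v <;> simp [hv]
      · have hc : (pvTrigB w && !(v :: t'').isEmpty) = false := by simp [hw]
        rw [hc]
        simp only [Bool.false_eq_true, if_false, List.foldl_nil, List.nil_append]
        rw [fold_shift nd _ _ _ (pos_nonneg _), ih v v]
        simp [pvScan, hw]

-- B's foldl produces head :: scan
lemma foldB_eq_scan (nd : List (String × String)) (t : List String) :
    ∀ (acc : List String) (f : Bool),
    (t.foldl (fun (acc : List String × Bool) w =>
        (acc.1 ++ [if acc.2 && !pvInDictB nd w then PySem.Str.lower w else w], pvTrigB w))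
      (acc, f)).1 = acc ++ pvScan nd f t := by
  induction t with
  | nil => intro acc f; simp [pvScan]
  | cons w t' ih =>
      intro acc f
      simp only [List.foldl_cons, pvScan]
      rw [ih]
      simp

-- ===== VERDICT (by name: the statement is the Claim_ definition above) =====
theorem naiveDecase_spec : Claim_equal_naiveDecase := by
  intro sent namesDict _ hpre
  unfold Spec_naiveDecase naiveDecase naiveDecase_alt
  by_cases hs : sent = ""
  · simp [hs]
  · have hsne : (sent == "") = false := by simp [hs]
    rw [hsne]
    simp only [Bool.false_eq_true, if_false]
    rcases hpre with h | hsp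
    · exact absurd h hs
    obtain ⟨w0, rest, hws⟩ : ∃ w0 rest, PySem.Str.split₀ sent = w0 :: rest := by
      cases h : PySem.Str.split₀ sent with
      | nil => exact absurd h hsp
      | cons a b => exact ⟨a, b, rfl⟩
    rw [hws]
    have hnil : ((w0 :: rest : List String) == ([] : List String)) = false := by simp
    rw [hnil]
    simp only [Bool.false_eq_true, if_false]
    have hget0 : PySem.List.pyGetD (w0 :: rest) 0 "" = w0 := by
      rw [PySem.List.pyGetD_of_nonneg _ _ (by omega : (0:Int) ≤ 0)]; rfl
    rw [hget0, PySem.List.slice_from_one]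
    set head := if pvInDictB namesDict w0 then w0
      else match PySem.Str.pyGet? w0 0 with
        | some c => String.ofList (PySem.Chars.lowerChar c :: w0.toList.drop 1)
        | none => w0 with hhead
    have hfixed : (if pvInDictA namesDict w0 then w0 :: rest
        else
          match PySem.Str.pyGet? w0 0 with
          | some c => PySem.List.pySetD (w0 :: rest) 0
              (String.ofList (PySem.Chars.lowerChar c :: w0.toList.drop 1))
          | none => w0 :: rest) = head :: rest := by
      rw [inDictA_eq, hhead]
      by_cases h0 : pvInDictB namesDict w0
      · simp [h0]
      · simp only [h0, Bool.false_eq_true, if_false]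
        cases hply : PySem.Str.pyGet? w0 0 with
        | none => rfl
        | some c =>
            show PySem.List.pySetD (w0 :: rest) 0 _ = _ :: rest
            rw [PySem.List.pySetD_of_nonneg _ _ (by omega : (0:Int) ≤ 0)]
            rfl
    rw [hfixed]
    rw [show (fun cur j =>
        if pvInDictA namesDict (PySem.List.pyGetD cur (j + 1) "") = true then cur
        else PySem.List.pySetD cur (j + 1) (PySem.Str.lower (PySem.List.pyGetD cur (j + 1) "")))
      = pvStep namesDict from rfl]
    rw [show ((PySem.List.enumerate (head :: rest) 0).filter
        (fun p => (pvInDictA pvEosA p.2 || p.2 == "\"") && p.1 != ((head :: rest).length : Int) - 1)).map (·.1)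
      = pvPos (head :: rest) from rfl]
    rw [fold_eq_scan namesDict rest head head]
    show PySem.Str.join " " (head :: pvScan namesDict (pvTrigB head) rest)
      = PySem.Str.join " " (rest.foldl (fun (acc : List String × Bool) w =>
          (acc.1 ++ [if acc.2 && !pvInDictB namesDict w then PySem.Str.lower w else w], pvTrigB w))
        ([head], pvTrigB head)).1
    rw [foldB_eq_scan namesDict rest [head] (pvTrigB head)]
    rfl
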